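-- pv_equiv track=rewrite | github.com/tarsojabbes/uri-python | Exercícios/analisaMenores.py | calcula_menor
-- ===== SOURCE A (Python) =====
-- def calcula_menor(triplas):
--     triplas = triplas.split()
--     menor = 0
--     lista = []
--     for i in range(len(triplas)):
--         if int(triplas[i]) <= int(triplas[menor]):
--             menor = i
--         lista.append(triplas[menor])
--     return lista
-- ===== SOURCE B (Python) =====
-- def calcula_menor(triplas):
--     toks = triplas.split()
--     vals = [int(t) for t in toks]
--     out = []
--     for i in range(len(toks)):
--         pre = vals[:i + 1]
--         m = min(pre)
--         j = 0
--         for idx, v in enumerate(pre):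
--             if v == m:
--                 j = idx
--         out.append(toks[j])
--     return out
-- ===== Notes on version B (the rewrite author's own statement) =====
-- stated objective: alternative
-- what changed: Replaces A's online index-tracking loop by a per-position offline computation: for each prefix it takes min() of the parsed values and then scans the prefix for the last index attaining that minimum (matching A's <= tie rule), trading A's O(n) single pass for a direct O(n^2) prefix-min/last-argmin formulation.
import Mathlib
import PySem

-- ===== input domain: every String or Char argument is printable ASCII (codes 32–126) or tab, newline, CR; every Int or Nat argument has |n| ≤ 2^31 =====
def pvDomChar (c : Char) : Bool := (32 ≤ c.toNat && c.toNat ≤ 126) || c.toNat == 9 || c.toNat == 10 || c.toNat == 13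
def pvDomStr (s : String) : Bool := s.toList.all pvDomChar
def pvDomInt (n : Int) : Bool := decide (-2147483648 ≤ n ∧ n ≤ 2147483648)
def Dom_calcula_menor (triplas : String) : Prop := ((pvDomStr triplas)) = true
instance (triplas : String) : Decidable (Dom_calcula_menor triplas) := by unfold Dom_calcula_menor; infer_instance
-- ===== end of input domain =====

-- B recomputes each output offline (prefix min + last-argmin scan, O(n^2)) instead of A's online index-tracking loop; alternative decomposition, return value only.

-- int(s); exact on Pre_ (every token parses), Pre_ excludes the ValueError inputs
def pyInt (s : String) : Int := (PySem.Int.ofStr? s).getD 0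

-- ===== PORT A =====
-- A's for-loop over range(len(triplas)) with the running index `menor`; indices i, menor are always in range, so getD is exact
def loopA (ts : List String) (menor : Nat) (i : Nat) : List String :=
  if _h : i < ts.length then
    let m := if pyInt (ts.getD i "") ≤ pyInt (ts.getD menor "") then i else menor
    ts.getD m "" :: loopA ts m (i + 1)
  else []
termination_by ts.length - i

def calcula_menor (triplas : String) : List String :=
  loopA (PySem.Str.split₀ triplas) 0 0

-- ===== PORT B =====
-- Source B's inner loop `for idx, v in enumerate(pre): if v == m: j = idx` (last index attaining m)
def lastEq (pre : List Int) (m : Int) : Nat :=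
  (PySem.List.enumerate pre 0).foldl (fun j p => if p.2 = m then p.1.toNat else j) 0

-- Source B: parse all tokens once, then for each i take the prefix, its min, and the last index attaining it
def calcula_menor_alt (triplas : String) : List String :=
  let ts := PySem.Str.split₀ triplas
  let vals := ts.map pyInt
  (List.range ts.length).map (fun i =>
    let pre := vals.take (i + 1)
    let m := (PySem.List.min? pre (fun x => x)).getD 0
    ts.getD (lastEq pre m) "")

-- ===== PRECONDITION & SPEC =====
-- Pre_ excludes exactly the inputs where some whitespace-split token is not a valid int literal: there Python's int() raises ValueError.
def Pre_calcula_menor (triplas : String) : Prop :=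
  ((PySem.Str.split₀ triplas).all (fun t => (PySem.Int.ofStr? t).isSome)) = true
instance (triplas : String) : Decidable (Pre_calcula_menor triplas) := by unfold Pre_calcula_menor; infer_instance
def pvWitness_calcula_menor : String := "3 1 01 2"

def Spec_calcula_menor (triplas : String) (out : List String) : Prop := out = calcula_menor_alt triplas
instance (triplas : String) (out : List String) : Decidable (Spec_calcula_menor triplas out) := by unfold Spec_calcula_menor; infer_instance

-- ===== CLAIM (what is proved, stated in full; the proofs are below) =====
def Claim_equal_calcula_menor : Prop := ∀ (triplas : String), Dom_calcula_menor triplas → Pre_calcula_menor triplas → Spec_calcula_menor triplas (calcula_menor triplas)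

-- ===== LEMMAS AND PROOFS =====

-- the running argmin index A maintains: amF ts (i+1) is `menor` after processing index i
def amF (ts : List String) : Nat → Nat
  | 0 => 0
  | i + 1 => if pyInt (ts.getD i "") ≤ pyInt (ts.getD (amF ts i) "") then i else amF ts i

theorem amF_succ (ts : List String) (i : Nat) :
    amF ts (i + 1) = if pyInt (ts.getD i "") ≤ pyInt (ts.getD (amF ts i) "") then i else amF ts i := by
  rfl

theorem amF_le (ts : List String) : ∀ i, amF ts i ≤ i := by
  intro i
  induction i with
  | zero => simp [amF]
  | succ i ih => unfold amF; split_ifs <;> omega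

theorem amF_succ_le (ts : List String) (i : Nat) : amF ts (i + 1) ≤ i := by
  unfold amF; split_ifs with h
  · exact le_rfl
  · exact amF_le ts i

theorem amF_min (ts : List String) : ∀ i k, k ≤ i →
    pyInt (ts.getD (amF ts (i + 1)) "") ≤ pyInt (ts.getD k "") := by
  intro i
  induction i with
  | zero =>
    intro k hk
    interval_cases k
    rw [amF_succ]
    split_ifs <;> simp [amF]
  | succ i ih =>
    intro k hk
    by_cases h : pyInt (ts.getD (i + 1) "") ≤ pyInt (ts.getD (amF ts (i + 1)) "")
    · have e : amF ts (i + 2) = i + 1 := by rw [amF_succ, if_pos h]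
      rw [e]
      rcases Nat.lt_or_ge k (i + 1) with hk' | hk'
      · exact le_trans h (ih k (by omega))
      · have : k = i + 1 := by omega
        subst this; exact le_rfl
    · have e : amF ts (i + 2) = amF ts (i + 1) := by rw [amF_succ, if_neg h]
      rw [e]
      rcases Nat.lt_or_ge k (i + 1) with hk' | hk'
      · exact ih k (by omega)
      · have : k = i + 1 := by omega
        subst this; exact le_of_lt (lt_of_not_ge h)

theorem amF_last (ts : List String) : ∀ i k, amF ts (i + 1) < k → k ≤ i →
    pyInt (ts.getD (amF ts (i + 1)) "") < pyInt (ts.getD k "") := by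
  intro i
  induction i with
  | zero =>
    intro k h1 h2
    have := amF_succ_le ts 0
    omega
  | succ i ih =>
    intro k h1 h2
    by_cases h : pyInt (ts.getD (i + 1) "") ≤ pyInt (ts.getD (amF ts (i + 1)) "")
    · have e : amF ts (i + 2) = i + 1 := by rw [amF_succ, if_pos h]
      rw [e] at h1 ⊢; omega
    · have e : amF ts (i + 2) = amF ts (i + 1) := by rw [amF_succ, if_neg h]
      rw [e] at h1 ⊢
      rcases Nat.lt_or_ge k (i + 1) with hk' | hk'
      · exact ih k h1 (by omega)
      · have : k = i + 1 := by omega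
        subst this; exact lt_of_not_ge h

-- A's loop produces, at each position j, the token at amF ts (j+1)
theorem loopA_eq_amF (ts : List String) (i : Nat) :
    loopA ts (amF ts i) i =
      (List.range' i (ts.length - i)).map (fun j => ts.getD (amF ts (j + 1)) "") := by
  have H : ∀ (fuel i : Nat), ts.length - i ≤ fuel →
      loopA ts (amF ts i) i =
        (List.range' i (ts.length - i)).map (fun j => ts.getD (amF ts (j + 1)) "") := by
    intro fuel
    induction fuel with
    | zero =>
      intro i h
      rw [loopA]
      have hi : ¬ i < ts.length := by omega
      have : ts.length - i = 0 := by omega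
      simp [hi, this]
    | succ fuel ih =>
      intro i h
      rw [loopA]
      by_cases hi : i < ts.length
      · simp only [hi, dif_pos]
        have e : (if pyInt (ts.getD i "") ≤ pyInt (ts.getD (amF ts i) "") then i else amF ts i)
            = amF ts (i + 1) := (amF_succ ts i).symm
        rw [e]
        have hr : ts.length - i = (ts.length - (i + 1)) + 1 := by omega
        rw [hr, List.range'_succ, List.map_cons]
        rw [ih (i + 1) (by omega)]
      · have : ts.length - i = 0 := by omega
        simp [hi, this]
  exact H (ts.length - i) i le_rfl

-- lastEq over an appended element
theorem lastEq_append (l : List Int) (x m : Int) :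
    lastEq (l ++ [x]) m = if x = m then l.length else lastEq l m := by
  unfold lastEq
  rw [PySem.List.enumerate_append, List.foldl_append]
  simp

-- characterization of lastEq: the LAST index whose value is m
theorem lastEq_spec (l : List Int) (m : Int) (hm : m ∈ l) :
    lastEq l m < l.length ∧ l.getD (lastEq l m) 0 = m ∧
      ∀ k, lastEq l m < k → k < l.length → l.getD k 0 ≠ m := by
  induction l using List.reverseRecOn with
  | nil => cases hm
  | append_singleton l x ih =>
    by_cases hx : x = m
    · have e : lastEq (l ++ [x]) m = l.length := by rw [lastEq_append, if_pos hx]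
      rw [e]
      refine ⟨by simp, ?_, ?_⟩
      · rw [List.getD_eq_getElem _ _ (by simp)]
        simpa using hx
      · intro k h1 h2
        simp at h2
        omega
    · have hm' : m ∈ l := by
        rcases List.mem_append.mp hm with h | h
        · exact h
        · simp at h; exact absurd h.symm hx
      rw [lastEq_append, if_neg hx]
      obtain ⟨h1, h2, h3⟩ := ih hm'
      refine ⟨by simp; omega, ?_, ?_⟩
      · rw [List.getD_eq_getElem _ _ (by simp; omega),
          List.getElem_append_left h1, ← List.getD_eq_getElem _ _ h1]
        exact h2
      · intro k hk1 hk2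
        simp at hk2
        rcases Nat.lt_or_ge k l.length with hkl | hkl
        · rw [List.getD_eq_getElem _ _ (by simp; omega),
            List.getElem_append_left hkl, ← List.getD_eq_getElem _ _ hkl]
          exact h3 k hk1 hkl
        · have : k = l.length := by omega
          subst this
          rw [List.getD_eq_getElem _ _ (by simp)]
          simpa using hx

-- prefix access: elements of (ts.map pyInt).take (i+1)
theorem pre_getD (ts : List String) (i k : Nat) (hi : i < ts.length) (hk : k ≤ i) :
    ((ts.map pyInt).take (i + 1)).getD k 0 = pyInt (ts.getD k "") := by
  have hk' : k < ((ts.map pyInt).take (i + 1)).length := by simp; omega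
  rw [List.getD_eq_getElem _ _ hk', List.getElem_take, List.getElem_map,
    List.getD_eq_getElem _ _ (by omega)]

theorem pre_length (ts : List String) (i : Nat) (hi : i < ts.length) :
    ((ts.map pyInt).take (i + 1)).length = i + 1 := by simp; omega

-- the prefix minimum is the value at A's running argmin
theorem min_eq_amF (ts : List String) (i : Nat) (hi : i < ts.length) :
    (PySem.List.min? ((ts.map pyInt).take (i + 1)) (fun x => x)).getD 0
      = pyInt (ts.getD (amF ts (i + 1)) "") := by
  set pre := (ts.map pyInt).take (i + 1) with hpre
  have hne : pre ≠ [] := by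
    intro h
    have := pre_length ts i hi
    rw [← hpre] at this
    simp [h] at this
  cases hmin : PySem.List.min? pre (fun x => x) with
  | none => exact absurd ((PySem.List.min?_eq_none_iff pre (fun x => x)).mp hmin) hne
  | some v =>
    simp only [Option.getD_some]
    have hvmem : v ∈ pre := PySem.List.min?_mem hmin
    have hvmin : ∀ y ∈ pre, v ≤ y := by
      intro y hy
      exact PySem.List.min?_isMin hmin y hy
    have ham_lt : amF ts (i + 1) ≤ i := amF_succ_le ts i
    have hamem : pyInt (ts.getD (amF ts (i + 1)) "") ∈ pre := by
      rw [← pre_getD ts i (amF ts (i + 1)) hi ham_lt,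
        List.getD_eq_getElem _ _ (by rw [pre_length ts i hi]; omega)]
      exact List.getElem_mem _
    -- v is some prefix element, so v ≥ the argmin value; and v ≤ every element
    obtain ⟨k, hk, hkv⟩ := List.getElem_of_mem hvmem
    have hk' : k ≤ i := by rw [pre_length ts i hi] at hk; omega
    have h1 : pyInt (ts.getD (amF ts (i + 1)) "") ≤ v := by
      rw [← hkv, ← List.getD_eq_getElem _ 0 hk, pre_getD ts i k hi hk']
      exact amF_min ts i k hk'
    exact le_antisymm (hvmin _ hamem) h1

-- B's per-position index equals A's running argmin
theorem lastEq_eq_amF (ts : List String) (i : Nat) (hi : i < ts.length) :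
    lastEq ((ts.map pyInt).take (i + 1))
        ((PySem.List.min? ((ts.map pyInt).take (i + 1)) (fun x => x)).getD 0)
      = amF ts (i + 1) := by
  set pre := (ts.map pyInt).take (i + 1) with hpre
  set m := (PySem.List.min? pre (fun x => x)).getD 0 with hm
  have hmval : m = pyInt (ts.getD (amF ts (i + 1)) "") := min_eq_amF ts i hi
  have ham_le : amF ts (i + 1) ≤ i := amF_succ_le ts i
  have hlen : pre.length = i + 1 := pre_length ts i hi
  have hmmem : m ∈ pre := by
    rw [hmval, ← pre_getD ts i (amF ts (i + 1)) hi ham_le,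
      List.getD_eq_getElem _ _ (by rw [pre_length ts i hi]; omega)]
    exact List.getElem_mem _
  obtain ⟨hr1, hr2, hr3⟩ := lastEq_spec pre m hmmem
  set r := lastEq pre m with hr
  -- the argmin also has value m and nothing after it has value m
  have ha2 : pre.getD (amF ts (i + 1)) 0 = m := by
    rw [pre_getD ts i (amF ts (i + 1)) hi ham_le, hmval]
  have ha3 : ∀ k, amF ts (i + 1) < k → k < pre.length → pre.getD k 0 ≠ m := by
    intro k hk1 hk2
    rw [pre_getD ts i k hi (by omega), hmval]
    exact ne_of_gt (amF_last ts i k hk1 (by omega))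
  rcases Nat.lt_trichotomy r (amF ts (i + 1)) with h | h | h
  · exact absurd ha2 (hr3 _ h (by omega))
  · exact h
  · exact absurd hr2 (ha3 r h (by omega))

-- ===== VERDICT (by name: the statement is the Claim_ definition above) =====
theorem calcula_menor_spec : Claim_equal_calcula_menor := by
  intro triplas _ _
  unfold Spec_calcula_menor calcula_menor calcula_menor_alt
  set ts := PySem.Str.split₀ triplas with hts
  have hA : loopA ts 0 0 =
      (List.range' 0 (ts.length - 0)).map (fun j => ts.getD (amF ts (j + 1)) "") := by
    have : (0 : Nat) = amF ts 0 := rfl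
    rw [this]
    exact loopA_eq_amF ts 0
  rw [hA]
  simp only [Nat.sub_zero, ← List.range_eq_range']
  apply List.map_congr_left
  intro i hi
  have hi' : i < ts.length := List.mem_range.mp hi
  rw [lastEq_eq_amF ts i hi']
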